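-- pv_equiv track=rewrite | github.com/freelife1191/closing-bet-demo | engine/collectors/krx_local_data_mixin.py | _stable_token_to_int
-- ===== SOURCE A (Python) =====
-- def _stable_token_to_int(token: str) -> int:
--     normalized = str(token or "")
--     if normalized.isdigit():
--         try:
--             return int(normalized)
--         except Exception:
--             pass
--     acc = 17
--     for ch in normalized:
--         acc = (acc * 31 + ord(ch)) % 2_000_000_000
--     return int(acc)
-- ===== SOURCE B (Python) =====
-- def _stable_token_to_int(token: str) -> int:
--     normalized = str(token or "")
--     maybe = None
--     if normalized.isdigit():
--         try:
--             maybe = int(normalized)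
--         except Exception:
--             pass
--     if maybe is not None:
--         return maybe
--     pows = []
--     p = 1
--     for _ in normalized:
--         pows.append(p)
--         p = p * 31 % 2_000_000_000
--     total = 17 * p
--     for ch, q in zip(reversed(normalized), pows):
--         total += ord(ch) * q
--     return int(total % 2_000_000_000)
-- ===== Notes on version B (the rewrite author's own statement) =====
-- stated objective: alternative
-- what changed: The stepwise-mod Horner loop is replaced by two staged passes: first build a table of powers of 31 mod 2_000_000_000, then sum ord(ch)*power over the reversed string (plus 17 times the top power) with a single final mod; the isdigit/int guard is restructured through an optional value instead of an early return.
import Mathlib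
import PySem

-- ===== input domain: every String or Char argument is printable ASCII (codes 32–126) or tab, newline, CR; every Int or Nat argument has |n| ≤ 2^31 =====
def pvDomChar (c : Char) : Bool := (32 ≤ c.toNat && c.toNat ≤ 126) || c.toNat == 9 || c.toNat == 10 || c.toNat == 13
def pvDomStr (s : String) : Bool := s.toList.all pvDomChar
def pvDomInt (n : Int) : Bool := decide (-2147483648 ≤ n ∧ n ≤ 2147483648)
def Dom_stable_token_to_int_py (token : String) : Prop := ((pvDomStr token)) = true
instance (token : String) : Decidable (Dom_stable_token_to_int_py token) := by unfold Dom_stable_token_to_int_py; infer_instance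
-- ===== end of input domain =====

-- B replaces A's stepwise-mod Horner loop by two staged passes — build a table of powers of 31
-- mod 2e9, then sum ord(ch)*power over the reversed string with one final mod (objective:
-- alternative decomposition; the isdigit/int guard is kept, restructured through an Option).

-- ===== PORT A =====
-- 'token or ""' on a str is the string itself (an empty string stays empty), so normalized = token.
def pvHashA (token : String) : Int :=
  token.toList.foldl (fun acc ch => (acc * 31 + (ch.toNat : Int)) % 2000000000) 17

def stable_token_to_int_py (token : String) : Int :=
  if PySem.Str.strIsdigit token then
    match PySem.Int.ofStr? token with
    | some n => n
    | none => pvHashA token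
  else pvHashA token

-- ===== PORT B =====
-- pass 1: pows=[], p=1; for _ in normalized: pows.append(p); p = p*31 % 2_000_000_000
def pvPowsB (l : List Char) : List Int × Int :=
  l.foldl (fun (s : List Int × Int) _ => (s.1 ++ [s.2], s.2 * 31 % 2000000000)) ([], 1)

-- pass 2: total = 17*p; for ch, q in zip(reversed(normalized), pows): total += ord(ch)*q
def pvHashB (token : String) : Int :=
  let s := pvPowsB token.toList
  let total := (token.toList.reverse.zip s.1).foldl
    (fun (t : Int) (cq : Char × Int) => t + (cq.1.toNat : Int) * cq.2) (17 * s.2)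
  total % 2000000000

-- maybe = int(normalized) when isdigit and parseable, else None; return maybe if not None
def stable_token_to_int_py_alt (token : String) : Int :=
  let maybe : Option Int :=
    if PySem.Str.strIsdigit token then PySem.Int.ofStr? token else none
  match maybe with
  | some n => n
  | none => pvHashB token

-- ===== PRECONDITION & SPEC =====
def Spec_stable_token_to_int_py (token : String) (out : Int) : Prop := out = stable_token_to_int_py_alt token
instance (token : String) (out : Int) : Decidable (Spec_stable_token_to_int_py token out) := by unfold Spec_stable_token_to_int_py; infer_instance

-- ===== CLAIM (what is proved, stated in full; the proofs are below) =====
def Claim_equal_stable_token_to_int_py : Prop := ∀ (token : String), Dom_stable_token_to_int_py token → Spec_stable_token_to_int_py token (stable_token_to_int_py token)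

-- ===== LEMMAS AND PROOFS =====

-- the raw (un-modded) Horner fold
def pvRaw (a : Int) (l : List Char) : Int :=
  l.foldl (fun acc ch => acc * 31 + (ch.toNat : Int)) a

theorem pvRaw_cons (a : Int) (c : Char) (l : List Char) :
    pvRaw a (c :: l) = pvRaw (a * 31 + (c.toNat : Int)) l := rfl

theorem pvRaw_seed (l : List Char) (a : Int) :
    pvRaw a l = a * 31 ^ l.length + pvRaw 0 l := by
  induction l generalizing a with
  | nil => simp [pvRaw]
  | cons c l ih =>
    rw [pvRaw_cons, pvRaw_cons, ih (a * 31 + (c.toNat : Int)), ih ((0:Int) * 31 + (c.toNat : Int))]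
    simp [List.length_cons]
    ring

theorem pvRaw_mod_seed (l : List Char) (a : Int) :
    pvRaw a l % 2000000000 = pvRaw (a % 2000000000) l % 2000000000 := by
  rw [pvRaw_seed l a, pvRaw_seed l (a % 2000000000)]
  have h : (a % 2000000000) ≡ a [ZMOD 2000000000] := Int.emod_emod_of_dvd a dvd_rfl
  exact ((h.mul_right _).add_right _).symm

-- A's stepwise-mod fold equals the raw fold mod M (seed already in range)
theorem pvHornerMod (l : List Char) (a : Int) (h0 : 0 ≤ a) (h1 : a < 2000000000) :
    l.foldl (fun acc ch => (acc * 31 + (ch.toNat : Int)) % 2000000000) a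
      = pvRaw a l % 2000000000 := by
  induction l generalizing a with
  | nil => simp [pvRaw]; omega
  | cons c l ih =>
    simp only [List.foldl_cons, pvRaw_cons]
    rw [ih _ (Int.emod_nonneg _ (by norm_num)) (Int.emod_lt_of_pos _ (by norm_num))]
    exact (pvRaw_mod_seed l _).symm

-- the table of powers B's first pass builds, and its final p
def pvPF (p : Int) : Nat → List Int
  | 0 => []
  | n + 1 => p :: pvPF (p * 31 % 2000000000) n

def pvPE (p : Int) : Nat → Int
  | 0 => p
  | n + 1 => pvPE (p * 31 % 2000000000) n

theorem pvPowsB_spec (l : List Char) : ∀ (acc : List Int) (p : Int),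
    l.foldl (fun (s : List Int × Int) _ => (s.1 ++ [s.2], s.2 * 31 % 2000000000)) (acc, p)
      = (acc ++ pvPF p l.length, pvPE p l.length) := by
  induction l with
  | nil => intro acc p; simp [pvPF, pvPE]
  | cons c l ih =>
    intro acc p
    simp only [List.foldl_cons, ih, List.length_cons, pvPF, pvPE, List.append_assoc,
      List.singleton_append]

theorem pvPE_modeq : ∀ (n : Nat) (p q : Int), p ≡ q [ZMOD 2000000000] →
    pvPE p n ≡ q * 31 ^ n [ZMOD 2000000000] := by
  intro n
  induction n with
  | zero => intro p q h; simpa [pvPE] using h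
  | succ n ih =>
    intro p q h
    have h31 : p * 31 % 2000000000 ≡ q * 31 [ZMOD 2000000000] :=
      (Int.emod_emod_of_dvd _ dvd_rfl).trans (h.mul_right 31)
    have := ih (p * 31 % 2000000000) (q * 31) h31
    calc pvPE p (n + 1) = pvPE (p * 31 % 2000000000) n := rfl
      _ ≡ q * 31 * 31 ^ n [ZMOD 2000000000] := this
      _ = q * 31 ^ (n + 1) := by ring

-- reversed power-weighted sum, un-modded
def pvS : List Char → Int → Int
  | [], _ => 0
  | c :: r, p => (c.toNat : Int) * p + pvS r (p * 31)

theorem pvS_raw : ∀ (r : List Char) (p : Int), pvS r p = pvRaw 0 r.reverse * p := by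
  intro r
  induction r with
  | nil => intro p; simp [pvS, pvRaw]
  | cons c r ih =>
    intro p
    have happ : pvRaw 0 (r.reverse ++ [c]) = pvRaw 0 r.reverse * 31 + (c.toNat : Int) := by
      simp [pvRaw, List.foldl_append]
    simp only [pvS, ih, List.reverse_cons, happ]
    ring

-- B's second pass: fold over the zip, congruent to the un-modded sum
theorem pvZipFold : ∀ (r : List Char) (p q t u : Int),
    p ≡ q [ZMOD 2000000000] → t ≡ u [ZMOD 2000000000] →
    (r.zip (pvPF p r.length)).foldl
        (fun (t : Int) (cq : Char × Int) => t + (cq.1.toNat : Int) * cq.2) t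
      ≡ u + pvS r q [ZMOD 2000000000] := by
  intro r
  induction r with
  | nil => intro p q t u _ ht; simpa [pvS] using ht
  | cons c r ih =>
    intro p q t u hp ht
    have h31 : p * 31 % 2000000000 ≡ q * 31 [ZMOD 2000000000] :=
      (Int.emod_emod_of_dvd _ dvd_rfl).trans (hp.mul_right 31)
    have ht' : t + (c.toNat : Int) * p ≡ u + (c.toNat : Int) * q [ZMOD 2000000000] :=
      ht.add (hp.mul_left _)
    have := ih (p * 31 % 2000000000) (q * 31) (t + (c.toNat : Int) * p)
      (u + (c.toNat : Int) * q) h31 ht'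
    calc (( c :: r).zip (pvPF p (c :: r).length)).foldl
           (fun (t : Int) (cq : Char × Int) => t + (cq.1.toNat : Int) * cq.2) t
        = (r.zip (pvPF (p * 31 % 2000000000) r.length)).foldl
           (fun (t : Int) (cq : Char × Int) => t + (cq.1.toNat : Int) * cq.2)
           (t + (c.toNat : Int) * p) := by
          simp [pvPF, List.zip_cons_cons]
      _ ≡ u + (c.toNat : Int) * q + pvS r (q * 31) [ZMOD 2000000000] := this
      _ = u + pvS (c :: r) q := by simp [pvS]; ring

theorem pvHash_eq (token : String) : pvHashA token = pvHashB token := by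
  unfold pvHashA pvHashB pvPowsB
  rw [pvHornerMod _ 17 (by norm_num) (by norm_num)]
  rw [pvPowsB_spec token.toList [] 1]
  simp only [List.nil_append]
  set l := token.toList with hl
  have hlen : l.length = l.reverse.length := List.length_reverse.symm
  have hPE : 17 * pvPE 1 l.length ≡ 17 * (1 * 31 ^ l.length) [ZMOD 2000000000] :=
    (pvPE_modeq l.length 1 1 Int.ModEq.rfl).mul_left 17
  have hz := pvZipFold l.reverse 1 1 (17 * pvPE 1 l.length) (17 * (1 * 31 ^ l.length))
    Int.ModEq.rfl hPE
  rw [hlen] at *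
  have hfinal : (l.reverse.zip (pvPF 1 l.reverse.length)).foldl
      (fun (t : Int) (cq : Char × Int) => t + (cq.1.toNat : Int) * cq.2)
      (17 * pvPE 1 l.reverse.length)
      ≡ pvRaw 17 l [ZMOD 2000000000] := by
    refine hz.trans ?_
    rw [pvS_raw l.reverse 1, List.reverse_reverse, pvRaw_seed l 17, List.length_reverse]
    ring_nf
    exact Int.ModEq.rfl
  exact hfinal.symm

-- ===== VERDICT (by name: the statement is the Claim_ definition above) =====
theorem stable_token_to_int_py_spec : Claim_equal_stable_token_to_int_py := by
  intro token _
  unfold Spec_stable_token_to_int_py stable_token_to_int_py stable_token_to_int_py_alt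
  by_cases h : PySem.Str.strIsdigit token
  · simp only [h, if_true]
    cases PySem.Int.ofStr? token with
    | none => exact pvHash_eq token
    | some n => rfl
  · simp only [h, Bool.false_eq_true, if_false]
    exact pvHash_eq token
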